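-- pv_equiv track=rewrite | github.com/carlzimmerman/zimmerman-formula | extended_research/biotech/z2_protein_folder_v8.py | _enforce_lengths
-- ===== SOURCE A (Python) =====
-- from typing import Dict, List, Tuple
--
-- def _enforce_lengths(ss: List[str]) -> List[str]:
--     """Enforce minimum segment lengths."""
--     n = len(ss)
--     result = ss.copy()
--
--     i = 0
--     while i < n:
--         curr = result[i]
--         j = i
--         while j < n and result[j] == curr:
--             j += 1
--         length = j - i
--
--         if curr == 'H' and length < 4:
--             for k in range(i, j):
--                 result[k] = 'C'
--         elif curr == 'E' and length < 2:
--             for k in range(i, j):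
--                 result[k] = 'C'
--
--         i = j
--
--     return result
-- ===== SOURCE B (Python) =====
-- def _run_ahead(ss):
--     """lengths[i] = length of the maximal run of equal values starting at i, built right-to-left."""
--     out = []
--     run = 0
--     prev = None
--     for s in reversed(ss):
--         run = run + 1 if prev is not None and s == prev else 1
--         out.append(run)
--         prev = s
--     out.reverse()
--     return out
--
--
-- def _enforce_lengths(ss):
--     """Enforce minimum segment lengths."""
--     right = _run_ahead(ss)
--     left = _run_ahead(ss[::-1])[::-1]
--     return ['C' if (c == 'H' and l + r - 1 < 4) or (c == 'E' and l + r - 1 < 2) else c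
--             for c, l, r in zip(ss, left, right)]
-- ===== Notes on version B (the rewrite author's own statement) =====
-- stated objective: alternative
-- what changed: Replaced the in-place run-scan rewrite with two per-index run-length passes (run-ahead lengths from the right, run-behind via the reversed list) and a zip that decides every character independently from the total run length containing it.
import Mathlib
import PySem

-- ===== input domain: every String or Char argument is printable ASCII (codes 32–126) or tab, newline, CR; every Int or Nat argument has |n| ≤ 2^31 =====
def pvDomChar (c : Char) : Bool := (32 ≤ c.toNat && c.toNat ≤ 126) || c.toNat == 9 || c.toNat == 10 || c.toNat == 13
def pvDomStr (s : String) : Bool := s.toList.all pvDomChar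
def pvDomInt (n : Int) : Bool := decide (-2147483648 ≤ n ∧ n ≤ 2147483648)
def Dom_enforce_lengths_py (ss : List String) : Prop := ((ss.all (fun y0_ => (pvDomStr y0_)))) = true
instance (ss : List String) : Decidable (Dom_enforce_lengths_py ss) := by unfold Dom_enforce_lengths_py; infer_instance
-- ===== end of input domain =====

-- B replaces A's in-place run-scan rewrite by two per-index run-length passes (run-ahead
-- from the right, run-behind via the reversed list) and a per-index zip; same values.

-- ===== PORT A =====
-- inner `while j < n and result[j] == curr: j += 1` (result[j] read with j < n, so getD's default is never used)
def pvFindJ (result : List String) (curr : String) (j n : Nat) : Nat :=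
  if h : j < n ∧ result.getD j "" = curr then pvFindJ result curr (j + 1) n else j
termination_by n - j
decreasing_by omega

-- pvFindJ only moves forward (termination helper for the outer loop)
theorem pvFindJ_ge (result : List String) (curr : String) (j n : Nat) :
    j ≤ pvFindJ result curr j n := by
  unfold pvFindJ
  split
  · exact Nat.le_trans (Nat.le_succ j) (pvFindJ_ge result curr (j + 1) n)
  · exact Nat.le_refl j
termination_by n - j
decreasing_by rename_i h; omega

-- `for k in range(i, j): result[k] = 'C'` (k runs over i, i+1, …, j-1)
def pvSetRange (l : List String) (i j : Nat) (v : String) : List String :=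
  (List.range' i (j - i)).foldl (fun acc k => acc.set k v) l

-- outer `while i < n:` loop of A
def pvLoop (result : List String) (i n : Nat) : List String :=
  if h : i < n then
    let curr := result.getD i ""
    let j := pvFindJ result curr i n
    let result' :=
      if curr = "H" ∧ j - i < 4 then pvSetRange result i j "C"
      else if curr = "E" ∧ j - i < 2 then pvSetRange result i j "C"
      else result
    pvLoop result' j n
  else result
termination_by n - i
decreasing_by
  have h1 : i + 1 ≤ pvFindJ result (result.getD i "") i n := by
    have := pvFindJ_ge result (result.getD i "") (i + 1) n
    unfold pvFindJ
    simp only [h, true_and]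
    rw [dif_pos trivial]
    omega
  omega

def enforce_lengths_py (ss : List String) : List String :=
  -- n = len(ss); result = ss.copy(); i = 0; while-loop; return result
  pvLoop ss 0 ss.length

-- ===== PORT B =====
-- one step of _run_ahead's loop: state is (out, run, prev)
def pvRunStep (st : List Nat × Nat × Option String) (s : String) : List Nat × Nat × Option String :=
  let run := if st.2.2 = some s then st.2.1 + 1 else 1
  (st.1 ++ [run], run, some s)

-- _run_ahead: loop over reversed(ss) appending, then out.reverse()
def pvRunAhead (ss : List String) : List Nat :=
  (ss.reverse.foldl pvRunStep ([], 0, none)).1.reverse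

def enforce_lengths_py_alt (ss : List String) : List String :=
  let right := pvRunAhead ss
  let left := (pvRunAhead ss.reverse).reverse
  -- the zip of the three lists, ported as a zip of ss with the (left, right) pairs
  List.zipWith
    (fun c lr =>
      if (c = "H" ∧ lr.1 + lr.2 - 1 < 4) ∨ (c = "E" ∧ lr.1 + lr.2 - 1 < 2) then "C" else c)
    ss (left.zip right)

-- ===== PRECONDITION & SPEC =====
def Spec_enforce_lengths_py (ss : List String) (out : List String) : Prop := out = enforce_lengths_py_alt ss
instance (ss : List String) (out : List String) : Decidable (Spec_enforce_lengths_py ss out) := by unfold Spec_enforce_lengths_py; infer_instance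

-- ===== CLAIM (what is proved, stated in full; the proofs are below) =====
def Claim_equal_enforce_lengths_py : Prop := ∀ (ss : List String), Dom_enforce_lengths_py ss → Spec_enforce_lengths_py ss (enforce_lengths_py ss)

-- ===== LEMMAS AND PROOFS =====

-- the maximal runs of ss, each as (value, run length): common description of both programs
def pvGroups (l : List String) : List (String × Nat) :=
  match l with
  | [] => []
  | x :: xs =>
      (x, (xs.takeWhile (fun y => y = x)).length + 1) ::
        pvGroups (xs.dropWhile (fun y => y = x))
termination_by l.length
decreasing_by
  simp only [List.length_cons]
  have := xs.length_dropWhile_le (fun y => y = x)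
  omega

-- what one run contributes to the output
def pvFix (c : String) (len : Nat) : List String :=
  if (c = "H" ∧ len < 4) ∨ (c = "E" ∧ len < 2) then List.replicate len "C"
  else List.replicate len c

-- [k, k-1, …, 1] and its reverse [1, …, k]
def descL : Nat → List Nat
  | 0 => []
  | k + 1 => (k + 1) :: descL k

-- recursive specification of _run_ahead
def runSpec : List String → List Nat
  | [] => []
  | x :: xs => (if xs.head? = some x then (runSpec xs).headD 0 + 1 else 1) :: runSpec xs

theorem foldr_runStep (ss : List String) :
    ss.foldr (fun s st => pvRunStep st s) ([], 0, none)
      = ((runSpec ss).reverse, (runSpec ss).headD 0, ss.head?) := by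
  induction ss with
  | nil => rfl
  | cons x xs ih =>
    rw [List.foldr_cons, ih]
    simp only [pvRunStep, runSpec]
    by_cases h : xs.head? = some x <;> simp [h]

theorem pvRunAhead_eq (ss : List String) : pvRunAhead ss = runSpec ss := by
  unfold pvRunAhead
  rw [List.foldl_reverse]
  rw [foldr_runStep]
  simp

theorem length_descL (k : Nat) : (descL k).length = k := by
  induction k with
  | zero => rfl
  | succ k ih => simp [descL, ih]

theorem getElem_descL (k i : Nat) (h : i < (descL k).length) : (descL k)[i] = k - i := by
  induction k generalizing i with
  | zero => simp [descL] at h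
  | succ k ih =>
    match i with
    | 0 => simp [descL]
    | i + 1 =>
      simp only [descL] at h ⊢
      rw [List.getElem_cons_succ]
      rw [ih i (by simpa using h)]
      omega

-- runSpec splits at a run boundary
theorem runSpec_append (a b : List String)
    (hb : ∀ u, a.getLast? = some u → b.head? ≠ some u) :
    runSpec (a ++ b) = runSpec a ++ runSpec b := by
  induction a with
  | nil => simp [runSpec]
  | cons x xs ih =>
    match xs with
    | [] =>
      have : b.head? ≠ some x := hb x (by simp)
      simp [runSpec, this]
    | y :: ys =>
      have hlast : (x :: y :: ys).getLast? = (y :: ys).getLast? := by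
        simp [List.getLast?_cons_cons]
      have ih' := ih (fun u hu => hb u (by rw [hlast]; exact hu))
      have hne : runSpec (y :: ys) ≠ [] := by simp [runSpec]
      have hcons : ((x :: y :: ys) ++ b) = x :: ((y :: ys) ++ b) := rfl
      rw [hcons, runSpec, ih']
      have hrhs : runSpec (x :: y :: ys)
          = (if (y :: ys).head? = some x then (runSpec (y :: ys)).headD 0 + 1 else 1)
              :: runSpec (y :: ys) := rfl
      rw [hrhs, List.cons_append]
      congr 1

theorem runSpec_replicate (k : Nat) (x : String) : runSpec (List.replicate k x) = descL k := by
  induction k with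
  | zero => rfl
  | succ k ih =>
    match k with
    | 0 => simp [runSpec, descL]
    | k + 1 =>
      simp only [List.replicate_succ, runSpec] at ih ⊢
      rw [ih]
      simp [descL]

-- runSpec on a maximal leading run followed by the rest
theorem runSpec_rep_append (k : Nat) (x : String) (rest : List String)
    (h : rest.head? ≠ some x) :
    runSpec (List.replicate k x ++ rest) = descL k ++ runSpec rest := by
  rcases Nat.eq_zero_or_pos k with hk | hk
  · subst hk; simp [descL]
  · rw [runSpec_append, runSpec_replicate]
    intro u hu
    rw [List.getLast?_replicate] at hu
    have hk0 : k ≠ 0 := by omega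
    simp [hk0] at hu
    subst hu; exact h

-- the left-pass values for the same decomposition
theorem left_rep_append (k : Nat) (x : String) (rest : List String)
    (h : rest.head? ≠ some x) :
    (runSpec ((List.replicate k x ++ rest).reverse)).reverse
      = (descL k).reverse ++ (runSpec rest.reverse).reverse := by
  rw [List.reverse_append, List.reverse_replicate]
  rw [runSpec_append]
  · rw [runSpec_replicate, List.reverse_append]
  · intro u hu hbu
    rcases Nat.eq_zero_or_pos k with hk | hk
    · subst hk; simp at hbu
    · have hx : u = x := by
        have : (List.replicate k x).head? = some x := by
          cases k with
          | zero => omega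
          | succ k => simp [List.replicate_succ]
        rw [this] at hbu
        exact (Option.some_inj.mp hbu).symm
      subst hx
      rw [List.getLast?_reverse] at hu
      exact h hu

-- the zip chunk for one run collapses to pvFix
theorem zip_chunk (k : Nat) (x : String) :
    List.zipWith
      (fun c (lr : Nat × Nat) =>
        if (c = "H" ∧ lr.1 + lr.2 - 1 < 4) ∨ (c = "E" ∧ lr.1 + lr.2 - 1 < 2) then "C" else c)
      (List.replicate k x) (((descL k).reverse).zip (descL k)) = pvFix x k := by
  apply List.ext_getElem
  · simp [pvFix, length_descL]
    split <;> simp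
  · intro i h1 h2
    have hik : i < k := by
      simp [length_descL] at h1
      omega
    simp only [List.getElem_zipWith, List.getElem_zip, List.getElem_replicate,
      List.getElem_reverse, getElem_descL, length_descL]
    have e : k - (k - 1 - i) + (k - i) - 1 = k := by omega
    rw [e]
    unfold pvFix
    split <;> rw [List.getElem_replicate]

-- the head element of dropWhile fails the predicate
theorem head?_dropWhile_ne (xs : List String) (x : String) :
    (xs.dropWhile (fun y => y = x)).head? ≠ some x := by
  induction xs with
  | nil => simp
  | cons y ys ih =>
    by_cases h : y = x
    · simpa [List.dropWhile_cons, h] using ih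
    · simp [h]

-- B computes the run-by-run rebuild
theorem alt_eq_flatMap (m : Nat) : ∀ (l : List String), l.length ≤ m →
    enforce_lengths_py_alt l = (pvGroups l).flatMap (fun g => pvFix g.1 g.2) := by
  induction m with
  | zero =>
    intro l hl
    have : l = [] := List.eq_nil_of_length_eq_zero (by omega)
    subst this
    simp [enforce_lengths_py_alt, pvRunAhead, pvGroups]
  | succ m ih =>
    intro l hl
    match l with
    | [] => simp [enforce_lengths_py_alt, pvRunAhead, pvGroups]
    | x :: xs =>
      set t := (xs.takeWhile (fun y => y = x)).length with ht
      set rest := xs.dropWhile (fun y => y = x) with hrest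
      have hdecomp : x :: xs = List.replicate (t + 1) x ++ rest := by
        have hrep : x :: xs.takeWhile (fun y => y = x) = List.replicate (t + 1) x := by
          rw [List.eq_replicate_iff]
          refine ⟨by simp [ht], ?_⟩
          intro b hb
          rcases List.mem_cons.mp hb with h | h
          · exact h
          · exact of_decide_eq_true (List.mem_takeWhile_imp (p := fun y => decide (y = x)) h)
        calc x :: xs = x :: (xs.takeWhile (fun y => y = x) ++ xs.dropWhile (fun y => y = x)) := by
              rw [List.takeWhile_append_dropWhile]
          _ = List.replicate (t + 1) x ++ rest := by rw [← List.cons_append, hrep]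
      have hhead : rest.head? ≠ some x := head?_dropWhile_ne xs x
      have hrestlen : rest.length ≤ m := by
        have h1 : (List.replicate (t + 1) x ++ rest).length = xs.length + 1 := by
          rw [← hdecomp]; simp
        simp at h1
        simp at hl
        omega
      have hgroups : pvGroups (x :: xs) = (x, t + 1) :: pvGroups rest := by
        rw [pvGroups]
      rw [hgroups, hdecomp]
      simp only [enforce_lengths_py_alt]
      rw [pvRunAhead_eq, pvRunAhead_eq, runSpec_rep_append (t + 1) x rest hhead,
        left_rep_append (t + 1) x rest hhead]
      rw [List.zip_append (by simp [length_descL]), List.zipWith_append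
        (by simp [List.length_zip, length_descL])]
      rw [zip_chunk]
      have hrec := ih rest hrestlen
      simp only [enforce_lengths_py_alt] at hrec
      rw [pvRunAhead_eq, pvRunAhead_eq] at hrec
      rw [hrec]
      simp [List.flatMap_cons]

-- ===== A-side characterisation (same run-by-run rebuild) =====

theorem dropWhile_eq_drop_tw {α : Type} (p : α → Bool) (l : List α) :
    l.dropWhile p = l.drop (l.takeWhile p).length := by
  induction l with
  | nil => simp
  | cons x xs ih =>
    by_cases h : p x
    · simp [h, ih]
    · simp [h]

theorem take_tw_eq_takeWhile {α : Type} (p : α → Bool) (l : List α) :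
    l.take (l.takeWhile p).length = l.takeWhile p := by
  induction l with
  | nil => simp
  | cons x xs ih =>
    by_cases h : p x
    · simp [h, ih]
    · simp [h]

theorem pvFindJ_eq (l : List String) (curr : String) (j : Nat) (hj : j ≤ l.length) :
    pvFindJ l curr j l.length = j + ((l.drop j).takeWhile (fun y => y = curr)).length := by
  unfold pvFindJ
  by_cases h : j < l.length ∧ l.getD j "" = curr
  · obtain ⟨hlt, heq⟩ := h
    rw [dif_pos ⟨hlt, heq⟩]
    rw [pvFindJ_eq l curr (j + 1) (by omega)]
    have hdrop : l.drop j = l[j] :: l.drop (j + 1) := List.drop_eq_getElem_cons hlt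
    have hget : l[j] = curr := by
      rw [← List.getD_eq_getElem l "" hlt]; exact heq
    rw [hdrop]
    simp [hget]
    omega
  · rw [dif_neg h]
    by_cases hlt : j < l.length
    · have heq : ¬ l.getD j "" = curr := by tauto
      have hdrop : l.drop j = l[j] :: l.drop (j + 1) := List.drop_eq_getElem_cons hlt
      have hget : l[j] ≠ curr := by
        rw [List.getD_eq_getElem l "" hlt] at heq; exact heq
      rw [hdrop]
      simp [hget]
    · have : j = l.length := by omega
      subst this
      simp
termination_by l.length - j
decreasing_by omega

theorem pvSetRange_eq (v : String) :
    ∀ (k : Nat) (l : List String) (i : Nat), i + k ≤ l.length →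
    pvSetRange l i (i + k) v = l.take i ++ List.replicate k v ++ l.drop (i + k) := by
  intro k
  induction k with
  | zero => intro l i hi; simp [pvSetRange]
  | succ m ih =>
    intro l i hi
    have hilen : i < l.length := by omega
    have hstep : pvSetRange l i (i + (m + 1)) v
        = pvSetRange (l.set i v) (i + 1) ((i + 1) + m) v := by
      unfold pvSetRange
      have h1 : i + (m + 1) - i = m + 1 := by omega
      have h2 : (i + 1) + m - (i + 1) = m := by omega
      rw [h1, h2, List.range'_succ, List.foldl_cons]
    rw [hstep, ih (l.set i v) (i + 1) (by simp; omega)]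
    have hset : l.set i v = l.take i ++ v :: l.drop (i + 1) := by
      rw [List.set_eq_take_append_cons_drop, if_pos hilen]
    have htake : (l.set i v).take (i + 1) = l.take i ++ [v] := by
      rw [hset]
      rw [List.take_append]
      have hlen : (l.take i).length = i := List.length_take_of_le (by omega)
      rw [hlen]
      have : i + 1 - i = 1 := by omega
      rw [this]
      simp [List.take_succ_cons]
    have hdrop : (l.set i v).drop ((i + 1) + m) = l.drop (i + (m + 1)) := by
      rw [List.drop_set, if_pos (by omega)]
      congr 1
      omega
    rw [htake, hdrop]
    have : List.replicate (m + 1) v = [v] ++ List.replicate m v := by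
      simp [List.replicate_succ]
    rw [this]
    simp [List.append_assoc]

theorem pvLoop_eq (m : Nat) : ∀ (l : List String) (i : Nat), i ≤ l.length → l.length - i ≤ m →
    pvLoop l i l.length = l.take i ++ (pvGroups (l.drop i)).flatMap (fun g => pvFix g.1 g.2) := by
  induction m with
  | zero =>
    intro l i hi hm
    have : i = l.length := by omega
    subst this
    rw [pvLoop]
    simp [pvGroups]
  | succ m ih =>
    intro l i hi hm
    by_cases hlt : i < l.length
    · have hcurr : l.getD i "" = l[i] := List.getD_eq_getElem l "" hlt
      have hdropi : l.drop i = l[i] :: l.drop (i + 1) := List.drop_eq_getElem_cons hlt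
      have ht : ((l.drop (i + 1)).takeWhile (fun y => y = l[i])).length
          ≤ l.length - (i + 1) := by
        have h1 := (List.takeWhile_sublist (l := l.drop (i + 1))
          (fun y => decide (y = l[i]))).length_le
        simpa using h1
      have hJ : pvFindJ l (l.getD i "") i l.length
          = i + (((l.drop (i + 1)).takeWhile (fun y => y = l[i])).length + 1) := by
        rw [hcurr, pvFindJ_eq l l[i] i (by omega), hdropi, List.takeWhile_cons,
          if_pos (by simp), List.length_cons]
      set t := ((l.drop (i + 1)).takeWhile (fun y => y = l[i])).length with hsett
      have hjle : i + (t + 1) ≤ l.length := by omega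
      have hdropj : l.drop (i + (t + 1)) = (l.drop (i + 1)).dropWhile (fun y => y = l[i]) := by
        rw [dropWhile_eq_drop_tw, ← hsett, List.drop_drop]
        congr 1
        omega
      have hgroups : pvGroups (l.drop i)
          = (l[i], t + 1) :: pvGroups (l.drop (i + (t + 1))) := by
        rw [hdropi, pvGroups, hdropj]
      rw [pvLoop, dif_pos hlt]
      simp only [hJ]
      by_cases hc : (l[i] = "H" ∧ t + 1 < 4) ∨ (l[i] = "E" ∧ t + 1 < 2)
      · have hji : i + (t + 1) - i = t + 1 := by omega
        have hres : (if l.getD i "" = "H" ∧ i + (t + 1) - i < 4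
              then pvSetRange l i (i + (t + 1)) "C"
              else if l.getD i "" = "E" ∧ i + (t + 1) - i < 2
                then pvSetRange l i (i + (t + 1)) "C" else l)
            = pvSetRange l i (i + (t + 1)) "C" := by
          rcases hc with ⟨h1, h2⟩ | ⟨h1, h2⟩ <;> rw [hcurr] <;> simp [h1, hji, h2]
        rw [hres]
        have hform : pvSetRange l i (i + (t + 1)) "C"
            = l.take i ++ List.replicate (t + 1) "C" ++ l.drop (i + (t + 1)) :=
          pvSetRange_eq "C" (t + 1) l i hjle
        have hlen' : (pvSetRange l i (i + (t + 1)) "C").length = l.length := by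
          rw [hform]
          simp [List.length_take, List.length_drop]
          omega
        have htk : (pvSetRange l i (i + (t + 1)) "C").take (i + (t + 1))
            = l.take i ++ List.replicate (t + 1) "C" := by
          rw [hform]
          exact List.take_left' (by simp [List.length_take]; omega)
        have hdr : (pvSetRange l i (i + (t + 1)) "C").drop (i + (t + 1)) = l.drop (i + (t + 1)) := by
          rw [hform]
          exact List.drop_left' (by simp [List.length_take]; omega)
        have := ih (pvSetRange l i (i + (t + 1)) "C") (i + (t + 1))
          (by rw [hlen']; exact hjle) (by rw [hlen']; omega)
        rw [hlen'] at this
        rw [this, htk, hdr, hgroups]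
        have hfix : pvFix l[i] (t + 1) = List.replicate (t + 1) "C" := by
          unfold pvFix
          rw [if_pos hc]
        simp [hfix, List.append_assoc]
      · have hji : i + (t + 1) - i = t + 1 := by omega
        have hres : (if l.getD i "" = "H" ∧ i + (t + 1) - i < 4
              then pvSetRange l i (i + (t + 1)) "C"
              else if l.getD i "" = "E" ∧ i + (t + 1) - i < 2
                then pvSetRange l i (i + (t + 1)) "C" else l) = l := by
          rw [hcurr, hji]
          split_ifs with h1 h2
          · exact absurd (Or.inl h1) hc
          · exact absurd (Or.inr h2) hc
          · rfl
        rw [hres, ih l (i + (t + 1)) hjle (by omega), hgroups]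
        have htk : l.take (i + (t + 1))
            = l.take i ++ (l[i] :: (l.drop (i + 1)).takeWhile (fun y => y = l[i])) := by
          rw [List.take_add, hdropi, List.take_succ_cons, hsett, take_tw_eq_takeWhile]
        have hrep : (l[i] :: (l.drop (i + 1)).takeWhile (fun y => y = l[i]))
            = List.replicate (t + 1) l[i] := by
          rw [List.eq_replicate_iff]
          constructor
          · simp [hsett]
          · intro b hb
            rcases List.mem_cons.mp hb with h | h
            · exact h
            · exact of_decide_eq_true
                (List.mem_takeWhile_imp (p := fun y => decide (y = l[i])) h)
        have hfix : pvFix l[i] (t + 1) = List.replicate (t + 1) l[i] := by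
          unfold pvFix
          rw [if_neg hc]
        rw [htk, hrep]
        simp [hfix, List.append_assoc]
    · have : i = l.length := by omega
      subst this
      rw [pvLoop, dif_neg (by omega)]
      simp [pvGroups]

-- ===== VERDICT (by name: the statement is the Claim_ definition above) =====
theorem enforce_lengths_py_spec : Claim_equal_enforce_lengths_py := by
  intro ss _
  unfold Spec_enforce_lengths_py enforce_lengths_py
  rw [pvLoop_eq ss.length ss 0 (Nat.zero_le _) (by omega),
    alt_eq_flatMap ss.length ss (Nat.le_refl _)]
  simp
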